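-- pv_equiv track=rewrite | github.com/tilebox/tilebox-python | tilebox-datasets/tilebox/datasets/protobuf_conversion/protobuf_xarray.py | _combine_dimension_names
-- ===== SOURCE A (Python) =====
-- def _combine_dimension_names(array_dimensions: dict[str, int]) -> dict[str, tuple[str, int]]:
--     """Assign dimension names to the given array dimensions by their field_names.
--
--     The dimension names default to n_<field_name>. However there is a special case for arrays with the same dimensions:
--     If one field is called <field_name> and another <field_name>_<some_suffix>, then the dimension name will be
--     n_<field_name>. E.g. the array fields int_metrics and int_metrics_count would share the dimension name
--     n_int_metrics if they have the same size.
--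
--     Args:
--         array_dimensions: The array dimension mapping (field_name: dimension size) to assign dimension names to
--
--     Returns:
--         Dict mapping from field names to dimension names and sizes
--     """
--     dimension_names = {}
--     for dim_name, size in array_dimensions.items():
--         dimension_names[dim_name] = (dim_name, size)
--         for other_dim_name, other_size in array_dimensions.items():
--             # strip the last character from the field name because to account for plural forms, e.g. metric and metrics
--             if other_dim_name != dim_name and size == other_size and dim_name.startswith(other_dim_name[:-1]):
--                 dimension_names[dim_name] = (other_dim_name, size)  # overwrite the default entry
--
--     return dimension_names
-- ===== SOURCE B (Python) =====
-- def _combine_dimension_names(array_dimensions: dict[str, int]) -> dict[str, tuple[str, int]]: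
--     """Group names by size once, then for each name scan only its size group in
--     reverse and stop at the first prefix match (= the last match in dict order)."""
--     by_size: dict[int, list[str]] = {}
--     for name, size in array_dimensions.items():
--         by_size.setdefault(size, []).append(name)
--     result = {}
--     for name, size in array_dimensions.items():
--         chosen = name
--         for other in reversed(by_size[size]):
--             if other != name and name.startswith(other[:-1]):
--                 chosen = other
--                 break
--         result[name] = (chosen, size)
--     return result
-- ===== Notes on version B (the rewrite author's own statement) =====
-- stated objective: alternative
-- what changed: B builds a size->names index in one pass and, per name, scans only its own size group in reverse, stopping at the first (= last-in-insertion-order) prefix match, instead of A's full inner scan over all entries with dict overwrites.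
import Mathlib
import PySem

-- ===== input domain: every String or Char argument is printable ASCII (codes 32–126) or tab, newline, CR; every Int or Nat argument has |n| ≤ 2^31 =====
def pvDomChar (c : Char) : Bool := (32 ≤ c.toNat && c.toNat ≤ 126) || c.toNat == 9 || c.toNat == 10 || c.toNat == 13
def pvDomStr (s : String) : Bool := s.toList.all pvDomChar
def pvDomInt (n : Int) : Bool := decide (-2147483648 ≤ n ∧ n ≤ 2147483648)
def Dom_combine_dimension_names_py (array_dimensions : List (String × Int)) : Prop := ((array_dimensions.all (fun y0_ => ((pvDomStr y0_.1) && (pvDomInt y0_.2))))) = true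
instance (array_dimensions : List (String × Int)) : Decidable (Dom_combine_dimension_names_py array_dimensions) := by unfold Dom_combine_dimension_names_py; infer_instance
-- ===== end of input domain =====

-- B groups the names by size once and, per name, scans only its size group backwards,
-- stopping at the first (= last-in-order) prefix match; objective: alternative (return value only).

-- ===== PORT A =====
def combine_dimension_names_py (array_dimensions : List (String × Int)) : List (String × String × Int) :=
  (array_dimensions.foldl (fun (dimension_names : PySem.Dict String (String × Int)) p =>
      let dimension_names := dimension_names.insert p.1 (p.1, p.2)
      array_dimensions.foldl (fun d q =>
        if (q.1 != p.1) && (p.2 == q.2) && PySem.Str.startswith p.1 (PySem.Str.slice q.1 none (some (-1))) then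
          d.insert p.1 (q.1, p.2)
        else d) dimension_names)
    PySem.Dict.empty).items

-- ===== PORT B =====
def combine_dimension_names_py_alt (array_dimensions : List (String × Int)) : List (String × String × Int) :=
  let by_size : PySem.Dict Int (List String) :=
    array_dimensions.foldl (fun d p => d.modify p.2 [] (· ++ [p.1])) PySem.Dict.empty
  array_dimensions.map (fun p =>
    let chosen :=
      (((by_size.getD p.2 []).reverse).find? (fun other =>
          (other != p.1) && PySem.Str.startswith p.1 (PySem.Str.slice other none (some (-1))))).getD p.1
    (p.1, chosen, p.2))

-- ===== PRECONDITION & SPEC =====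
-- The Python argument is a dict, so its keys are unique; association lists with a
-- duplicated first component represent no dict input and are excluded.
def Pre_combine_dimension_names_py (array_dimensions : List (String × Int)) : Prop :=
  (array_dimensions.map Prod.fst).Nodup
instance (array_dimensions : List (String × Int)) : Decidable (Pre_combine_dimension_names_py array_dimensions) := by unfold Pre_combine_dimension_names_py; infer_instance
def pvWitness_combine_dimension_names_py : (List (String × Int)) := [("metric", 3), ("metrics", 3), ("other", 2)]

def Spec_combine_dimension_names_py (array_dimensions : List (String × Int)) (out : List (String × String × Int)) : Prop := out = combine_dimension_names_py_alt array_dimensions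
instance (array_dimensions : List (String × Int)) (out : List (String × String × Int)) : Decidable (Spec_combine_dimension_names_py array_dimensions out) := by unfold Spec_combine_dimension_names_py; infer_instance

-- ===== CLAIM (what is proved, stated in full; the proofs are below) =====
def Claim_equal_combine_dimension_names_py : Prop := ∀ (array_dimensions : List (String × Int)), Dom_combine_dimension_names_py array_dimensions → Pre_combine_dimension_names_py array_dimensions → Spec_combine_dimension_names_py array_dimensions (combine_dimension_names_py array_dimensions)

-- ===== LEMMAS AND PROOFS =====

-- the inner A-loop only rewrites key k: it is an insert of the "last match" value
theorem foldl_insert_if_eq_insert_foldl {ν : Type} (l : List (String × Int))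
    (c : String × Int → Bool) (f : String × Int → ν) (k : String) (v : ν)
    (d : PySem.Dict String ν) :
    l.foldl (fun d q => if c q then d.insert k (f q) else d) (d.insert k v)
      = d.insert k (l.foldl (fun acc q => if c q then f q else acc) v) := by
  induction l generalizing v with
  | nil => rfl
  | cons x t ih =>
    simp only [List.foldl_cons]
    by_cases h : c x = true
    · simp [h, PySem.Dict.insert_insert_self, ih]
    · simp [h, ih]

-- a "keep the last match" fold is find? on the reversed list
theorem foldl_last_match {α β : Type} (l : List α) (c : α → Bool) (f : α → β) (v : β) :
    l.foldl (fun acc q => if c q then f q else acc) v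
      = ((l.reverse.find? c).map f).getD v := by
  induction l generalizing v with
  | nil => rfl
  | cons x t ih =>
    simp only [List.foldl_cons, List.reverse_cons, List.find?_append]
    rw [ih]
    cases h : t.reverse.find? c with
    | some q => simp
    | none =>
      by_cases hx : c x = true <;> simp [List.find?, hx]

theorem find?_filter' {α : Type} (l : List α) (p c : α → Bool) :
    (l.filter p).find? c = l.find? (fun x => p x && c x) := by
  induction l with
  | nil => rfl
  | cons x t ih =>
    by_cases hp : p x = true
    · by_cases hc : c x = true <;>
        simp [hp, hc, ih]
    · simp [hp, ih]


-- the per-entry value A ends up storing for p (proof-only helper)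
def valA (l : List (String × Int)) (p : String × Int) : String × Int :=
  ((l.reverse.find? (fun q =>
      (q.1 != p.1) && (p.2 == q.2) && PySem.Str.startswith p.1 (PySem.Str.slice q.1 none (some (-1))))).map
    (fun q => (q.1, p.2))).getD (p.1, p.2)

theorem portA_eq (l : List (String × Int)) (hpre : (l.map Prod.fst).Nodup) :
    combine_dimension_names_py l = l.map (fun p => (p.1, valA l p)) := by
  unfold combine_dimension_names_py
  have h2 := PySem.Dict.items_foldl_insert_fresh (l := l) (k := fun p : String × Int => p.1)
      (v := fun p => valA l p) (d := PySem.Dict.empty)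
      (by intro a _; exact PySem.Dict.contains_empty _) (by simpa using hpre)
  simp only [PySem.Dict.empty, List.nil_append] at h2
  rw [← h2]
  apply congrArg
  apply PySem.List.foldl_congr_mem
  intro acc p hp
  show (let dn := acc.insert p.1 (p.1, p.2);
        l.foldl (fun d q =>
          if (q.1 != p.1) && (p.2 == q.2) && PySem.Str.startswith p.1 (PySem.Str.slice q.1 none (some (-1))) then
            d.insert p.1 (q.1, p.2)
          else d) dn) = acc.insert p.1 (valA l p)
  rw [foldl_insert_if_eq_insert_foldl, foldl_last_match]
  rfl

theorem groups_eq (l : List (String × Int)) (c : Int) :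
    (l.foldl (fun d p => d.modify p.2 [] (· ++ [p.1])) PySem.Dict.empty).getD c []
      = (l.filter (fun q => q.2 == c)).map Prod.fst := by
  have hm : l.foldl (fun d p => d.modify p.2 [] (· ++ [p.1])) PySem.Dict.empty
      = (l.map (fun p : String × Int => (p.2, p.1))).foldl
          (fun d p => d.modify p.1 [] (· ++ [p.2])) PySem.Dict.empty := by
    rw [List.foldl_map]
  rw [hm, PySem.Dict.getD_foldl_modify_append]
  simp [List.filter_map, List.map_map, Function.comp_def]

theorem portB_eq (l : List (String × Int)) :
    combine_dimension_names_py_alt l = l.map (fun p => (p.1, valA l p)) := by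
  unfold combine_dimension_names_py_alt
  simp only []
  apply List.map_congr_left
  intro p _
  simp only [groups_eq]
  rw [← List.map_reverse, ← List.filter_reverse, List.find?_map, find?_filter']
  have hpred : (fun q : String × Int => q.2 == p.2 &&
        ((fun other => (other != p.1) && PySem.Str.startswith p.1 (PySem.Str.slice other none (some (-1)))) ∘ Prod.fst) q)
      = (fun q : String × Int =>
        (q.1 != p.1) && (p.2 == q.2) && PySem.Str.startswith p.1 (PySem.Str.slice q.1 none (some (-1)))) := by
    funext q
    simp [Function.comp, Bool.and_comm, Bool.and_left_comm, Bool.and_assoc]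
    rw [Bool.beq_comm]
  rw [hpred]
  unfold valA
  cases h : l.reverse.find? (fun q : String × Int =>
      (q.1 != p.1) && (p.2 == q.2) && PySem.Str.startswith p.1 (PySem.Str.slice q.1 none (some (-1)))) with
  | none => simp
  | some q => simp

-- ===== VERDICT (by name: the statement is the Claim_ definition above) =====
theorem combine_dimension_names_py_spec : Claim_equal_combine_dimension_names_py := by
  intro l _hdom hpre
  unfold Spec_combine_dimension_names_py
  rw [portA_eq l hpre, portB_eq l]
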